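-- pv_equiv track=rewrite | github.com/aperrier004/testBot | fonctions.py | hide_answer
-- ===== SOURCE A (Python) =====
-- def hide_answer(string):
--     """Returns a hint-string for string"""
--
--     hidden = "("
--     count = 0
--     for i in string:
--         if i in [" ", "-", "'", "’"]:
--             hidden += i
--         else:
--             hidden += '–'
--             count += 1
--     hidden += " : {} lettres)".format(count)
--     return hidden
-- ===== SOURCE B (Python) =====
-- def hide_answer(string):
--     """Returns a hint-string for string"""
--     seps = " -'’"
--     table = {ord(c): "–" for c in set(string) - set(seps)}
--     masked = string.translate(table)
--     count = len(string) - sum(string.count(sep) for sep in seps)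
--     return "(" + masked + " : {} lettres)".format(count)
-- ===== Notes on version B (the rewrite author's own statement) =====
-- stated objective: faster
-- what changed: Replaces A's single accumulating loop (string concatenation plus a running counter) by a translation-table pass — str.translate with a table built from the string's distinct non-separator characters (a set difference) — and recovers the count arithmetically as len(string) minus the sum of the four separator counts, instead of counting letters in the loop.
import Mathlib
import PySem

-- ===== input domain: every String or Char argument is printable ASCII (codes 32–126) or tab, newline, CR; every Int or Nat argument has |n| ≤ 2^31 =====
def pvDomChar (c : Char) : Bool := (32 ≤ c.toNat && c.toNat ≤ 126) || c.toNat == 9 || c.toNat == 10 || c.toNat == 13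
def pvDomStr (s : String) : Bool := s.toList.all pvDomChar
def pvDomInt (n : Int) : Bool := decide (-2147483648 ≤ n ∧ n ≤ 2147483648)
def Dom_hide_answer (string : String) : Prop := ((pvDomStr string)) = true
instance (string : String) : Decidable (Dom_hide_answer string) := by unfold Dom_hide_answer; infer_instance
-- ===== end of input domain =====

-- B replaces A's accumulating per-character loop (string += and a running counter) by a
-- translation-table pass (str.translate with a table built from the string's distinct
-- non-separator characters) plus an arithmetic count (len minus the separator counts);
-- same value on every input; measured faster at large sizes in a timing run.

-- ===== PORT A =====
-- A's loop: fold over the characters carrying (hidden, count).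
def hide_answer (string : String) : String :=
  let st := string.toList.foldl
    (fun (acc : List Char × Int) i =>
      if i ∈ [' ', '-', '\'', '’'] then (acc.1 ++ [i], acc.2)
      else (acc.1 ++ ['–'], acc.2 + 1))
    (['('], (0 : Int))
  String.ofList st.1 ++ " : " ++ PySem.Int.toStr st.2 ++ " lettres)"

-- ===== PORT B =====
-- B: translation table from the string's distinct non-separator characters (a set-difference,
-- consumed only by lookups, so its iteration order cannot matter), then translate, then
-- count = len(string) - sum of the four separator counts.
def hide_answer_alt (string : String) : String :=
  let seps : List Char := [' ', '-', '\'', '’']   -- the characters of " -'’"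
  let table : PySem.Dict Int String :=
    (PySem.Set.diff (PySem.Set.ofList string.toList) seps).foldl
      (fun d c => d.insert ((c.toNat : Int)) "–") PySem.Dict.empty
  let masked : List Char := string.toList.flatMap
      (fun c => match table.get? ((c.toNat : Int)) with
                | some r => r.toList
                | none   => [c])
  let count : Int := PySem.Str.len string
      - (seps.map (fun sep => (PySem.Chars.count string.toList [sep] : Int))).sum
  "(" ++ String.ofList masked ++ " : " ++ PySem.Int.toStr count ++ " lettres)"

-- ===== PRECONDITION & SPEC =====
def Spec_hide_answer (string : String) (out : String) : Prop := out = hide_answer_alt string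
instance (string : String) (out : String) : Decidable (Spec_hide_answer string out) := by unfold Spec_hide_answer; infer_instance

-- ===== CLAIM (what is proved, stated in full; the proofs are below) =====
def Claim_equal_hide_answer : Prop := ∀ (string : String), Dom_hide_answer string → Spec_hide_answer string (hide_answer string)

-- ===== LEMMAS AND PROOFS =====

-- Python's s.count(sub) for a one-character sub is the character count.
theorem go_single (c : Char) : ∀ (fuel : Nat) (l : List Char) (acc : Nat), l.length ≤ fuel →
    PySem.Chars.count.go [c] fuel l acc = acc + l.count c := by
  intro fuel
  induction fuel with
  | zero => intro l acc h; cases l with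
    | nil => simp [PySem.Chars.count.go]
    | cons a t => simp at h
  | succ n ih =>
    intro l acc h
    cases l with
    | nil => simp [PySem.Chars.count.go]
    | cons a t =>
      rw [PySem.Chars.count.go]
      by_cases hc : a = c
      · subst hc
        simp [List.isPrefixOf, ih t _ (by simpa using h)]
        omega
      · have hp : List.isPrefixOf [c] (a :: t) = false := by
          simp [List.isPrefixOf]; exact fun h' => hc (by simpa using h'.symm)
        simp [hp, ih t _ (by simpa using h), hc]

theorem count_single (l : List Char) (c : Char) : PySem.Chars.count l [c] = l.count c := by
  rw [PySem.Chars.count]; simp [go_single c l.length l 0 le_rfl]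

-- Lookup in the dict built by inserting the constant "–" at each key of the list.
theorem get?_fold_insert_dash (l : List Char) (d : PySem.Dict Int String) (k : Int) :
    (l.foldl (fun d c => d.insert ((c.toNat : Int)) "–") d).get? k
      = if k ∈ l.map (fun c => ((c.toNat : Int))) then some "–" else d.get? k := by
  induction l generalizing d with
  | nil => simp
  | cons a t ih =>
    simp only [List.foldl_cons, ih, List.map_cons, List.mem_cons]
    by_cases hk : k ∈ t.map (fun c => ((c.toNat : Int)))
    · simp [hk]
    · by_cases he : k = ((a.toNat : Int))
      · simp [he]
      · simp [hk, he, PySem.Dict.get?_insert]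

theorem char_toNat_inj (a b : Char) (h : a.toNat = b.toNat) : a = b := by
  apply Char.ext; unfold Char.toNat at h; exact UInt32.toNat_inj.mp h

-- The four separator counts sum to the separator countP.
theorem count_seps (l : List Char) :
    l.count ' ' + l.count '-' + l.count '\'' + l.count '’'
      = l.countP (fun c => decide (c ∈ [' ', '-', '\'', '’'])) := by
  induction l with
  | nil => simp
  | cons a t ih =>
    simp only [List.count_cons, List.countP_cons, List.mem_cons, List.not_mem_nil, or_false]
    by_cases h1 : a = ' ' <;> by_cases h2 : a = '-' <;> by_cases h3 : a = '\'' <;>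
      by_cases h4 : a = '’' <;> simp_all <;> omega

-- A's fold: masked body via map, counter via countP of the non-separators.
theorem hide_fold_eq (l : List Char) (acc : List Char) (n : Int) :
    l.foldl
      (fun (acc : List Char × Int) i =>
        if i ∈ [' ', '-', '\'', '’'] then (acc.1 ++ [i], acc.2)
        else (acc.1 ++ ['–'], acc.2 + 1))
      (acc, n)
    = (acc ++ l.map (fun c => if c ∈ [' ', '-', '\'', '’'] then c else '–'),
       n + (l.countP (fun c => !decide (c ∈ [' ', '-', '\'', '’'])) : Int)) := by
  induction l generalizing acc n with
  | nil => simp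
  | cons c t ih =>
    simp only [List.foldl_cons, List.map_cons, List.countP_cons]
    by_cases h : c ∈ [' ', '-', '\'', '’']
    · rw [if_pos h, ih, if_pos h]
      simp [h]
    · rw [if_neg h, ih, if_neg h]
      simp [h]
      ring

-- B's masked body is the same map.
theorem masked_eq (s : List Char) :
    s.flatMap (fun c =>
        match (PySem.Set.diff (PySem.Set.ofList s) [' ', '-', '\'', '’']).foldl
                (fun d c => d.insert ((c.toNat : Int)) "–") PySem.Dict.empty
              |>.get? ((c.toNat : Int)) with
        | some r => r.toList
        | none   => [c])
      = s.map (fun c => if c ∈ [' ', '-', '\'', '’'] then c else '–') := by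
  have hcong : ∀ c ∈ s,
      (match (PySem.Set.diff (PySem.Set.ofList s) [' ', '-', '\'', '’']).foldl
                (fun d c => d.insert ((c.toNat : Int)) "–") PySem.Dict.empty
              |>.get? ((c.toNat : Int)) with
        | some r => r.toList
        | none   => [c])
      = [if c ∈ [' ', '-', '\'', '’'] then c else '–'] := by
    intro c hc
    rw [get?_fold_insert_dash]
    have hmem : ((c.toNat : Int)) ∈ (PySem.Set.diff (PySem.Set.ofList s) [' ', '-', '\'', '’']).map
        (fun c => ((c.toNat : Int))) ↔ (c ∈ s ∧ c ∉ [' ', '-', '\'', '’']) := by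
      constructor
      · rintro h
        simp only [List.mem_map] at h
        obtain ⟨c', hc', he⟩ := h
        have : c' = c := char_toNat_inj _ _ (by exact_mod_cast he)
        subst this
        simpa [PySem.Set.mem_diff, PySem.Set.mem_ofList] using hc'
      · intro h
        exact List.mem_map.mpr ⟨c, by simpa [PySem.Set.mem_diff, PySem.Set.mem_ofList] using h, rfl⟩
    by_cases hsep : c ∈ [' ', '-', '\'', '’']
    · have : ((c.toNat : Int)) ∉ _ := fun h => (hmem.mp h).2 hsep
      simp [this, hsep]
    · have : ((c.toNat : Int)) ∈ _ := hmem.mpr ⟨hc, hsep⟩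
      simp [this, hsep]
  rw [List.flatMap_congr hcong, ← List.map_eq_flatMap]

-- ===== VERDICT (by name: the statement is the Claim_ definition above) =====
theorem hide_answer_spec : Claim_equal_hide_answer := by
  intro s _
  unfold Spec_hide_answer hide_answer hide_answer_alt
  simp only []
  rw [hide_fold_eq, masked_eq]
  have hcnt :
      PySem.Str.len s
        - (([' ', '-', '\'', '’'] : List Char).map
            (fun sep => (PySem.Chars.count s.toList [sep] : Int))).sum
      = (s.toList.countP (fun c => !decide (c ∈ [' ', '-', '\'', '’'])) : Int) := by
    simp only [List.map_cons, List.map_nil, List.sum_cons, List.sum_nil, count_single]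
    rw [PySem.Str.len_eq]
    have h1 := count_seps s.toList
    have h2 : s.toList.length
        = s.toList.countP (fun c => decide (c ∈ ([' ', '-', '\'', '’'] : List Char)))
          + s.toList.countP (fun c => !decide (c ∈ ([' ', '-', '\'', '’'] : List Char))) := by
      simpa using List.length_eq_countP_add_countP
        (p := fun c => decide (c ∈ ([' ', '-', '\'', '’'] : List Char))) (l := s.toList)
    omega
  rw [hcnt]
  simp [String.ext_iff]
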